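-- pv_equiv track=rewrite | github.com/cirosantilli/project-euler-solvers | solvers/203.py | solve
-- ===== SOURCE A (Python) =====
-- def is_squarefree(x: int, max_square: int) -> bool:
--     for p in range(2, max_square + 1):
--         if x % (p * p) == 0:
--             return False
--     return True
--
-- def solve(num_rows: int) -> int:
--     squarefree = {1}
--
--     current = [1]
--     for row in range(1, num_rows):
--         next_row = [1] * (len(current) + 1)
--         for col in range(1, len(next_row) - 1):
--             next_row[col] = current[col - 1] + current[col]
--
--         for i in range(1, len(next_row) // 2 + 1):
--             x = next_row[i]
--             if is_squarefree(x, num_rows):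
--                 squarefree.add(x)
--
--         current = next_row
--
--     total = sum(squarefree)
--     return total
-- ===== SOURCE B (Python) =====
-- def _is_prime(p):
--     return all(p % q for q in range(2, p))
--
--
-- def _scan_row(primes, n, seen):
--     # binomials of row n by the multiplicative recurrence; only prime squares can divide them
--     c = 1
--     for k in range(1, (n + 1) // 2 + 1):
--         c = c * (n - k + 1) // k
--         if c not in seen and all(c % (p * p) for p in primes):
--             seen.add(c)
--     return seen
--
--
-- def solve(num_rows: int) -> int:
--     primes = [p for p in range(2, num_rows) if _is_prime(p)]
--     seen = {1}
--     for n in range(1, num_rows):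
--         seen = _scan_row(primes, n, seen)
--     return sum(seen)
-- ===== Notes on version B (the rewrite author's own statement) =====
-- stated objective: alternative
-- what changed: B drops the stored Pascal triangle (each row's first half is regenerated by the multiplicative recurrence C(n,k)=C(n,k-1)*(n-k+1)//k) and tests squarefreeness by trial division over a precomputed list of primes below num_rows (skipping values already collected) instead of dividing by every integer square up to num_rows^2.
import Mathlib
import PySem

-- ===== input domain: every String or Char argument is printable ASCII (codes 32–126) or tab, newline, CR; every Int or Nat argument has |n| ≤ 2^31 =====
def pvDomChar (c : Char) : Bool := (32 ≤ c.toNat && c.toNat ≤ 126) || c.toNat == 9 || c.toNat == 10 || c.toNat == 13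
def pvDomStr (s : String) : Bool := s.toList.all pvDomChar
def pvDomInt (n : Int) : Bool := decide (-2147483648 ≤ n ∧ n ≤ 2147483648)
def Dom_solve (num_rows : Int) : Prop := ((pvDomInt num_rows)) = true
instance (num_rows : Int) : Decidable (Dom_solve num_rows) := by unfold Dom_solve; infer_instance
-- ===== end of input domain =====

-- B replaces the stored Pascal triangle and all-integer trial division by per-row
-- multiplicative binomial generation and trial division by squares of primes only
-- (objective: alternative algorithm; equal return value proved below).

-- ===== PORT A =====
-- is_squarefree: loop over p in range(2, max_square+1) with early `return False`
def isSquarefreeLoop (x : Int) : List Int → Bool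
  | [] => true
  | p :: ps => if PySem.Int.mod x (p * p) = 0 then false else isSquarefreeLoop x ps

def is_squarefree (x : Int) (max_square : Int) : Bool :=
  isSquarefreeLoop x (PySem.List.pyRange 2 (max_square + 1))

-- next_row = [1]*(len(current)+1); for col in range(1, len(next_row)-1): next_row[col] = current[col-1]+current[col]
def buildNext (current : List Int) : List Int :=
  (PySem.List.pyRange 1 (((List.replicate (current.length + 1) (1 : Int)).length : Int) - 1)).foldl
    (fun nr col =>
      PySem.List.pySetD nr col
        (PySem.List.pyGetD current (col - 1) 0 + PySem.List.pyGetD current col 0))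
    (List.replicate (current.length + 1) 1)

-- for i in range(1, len(next_row)//2 + 1): x = next_row[i]; if is_squarefree(x, num_rows): squarefree.add(x)
def rowScan (num_rows : Int) (squarefree : PySem.Set Int) (next_row : List Int) : PySem.Set Int :=
  (PySem.List.pyRange 1 (PySem.Int.floordiv (next_row.length : Int) 2 + 1)).foldl
    (fun sq i =>
      let x := PySem.List.pyGetD next_row i 0
      if is_squarefree x num_rows then PySem.Set.add sq x else sq)
    squarefree

def solve (num_rows : Int) : Int :=
  let res := (PySem.List.pyRange 1 num_rows).foldl
    (fun (st : PySem.Set Int × List Int) _row =>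
      let next_row := buildNext st.2
      (rowScan num_rows st.1 next_row, next_row))
    (PySem.Set.ofList [1], [1])
  res.1.sum

-- ===== PORT B =====
-- _is_prime(p) = all(p % q for q in range(2, p))
def isPrimeB (p : Int) : Bool :=
  (PySem.List.pyRange 2 p).all (fun q => !(PySem.Int.mod p q == 0))

-- primes = [p for p in range(2, num_rows) if _is_prime(p)]
def primesB (num_rows : Int) : List Int :=
  (PySem.List.pyRange 2 num_rows).filter isPrimeB

-- all(c % (p * p) for p in primes)
def sfB (c : Int) (primes : List Int) : Bool :=
  primes.all (fun p => !(PySem.Int.mod c (p * p) == 0))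

-- _scan_row: c = 1; for k in range(1, (n+1)//2 + 1): c = c*(n-k+1)//k; if c not in seen and …: seen.add(c)
def scanRowB (primes : List Int) (n : Int) (seen : PySem.Set Int) : PySem.Set Int :=
  ((PySem.List.pyRange 1 (PySem.Int.floordiv (n + 1) 2 + 1)).foldl
    (fun (st : Int × PySem.Set Int) k =>
      let c := PySem.Int.floordiv (st.1 * (n - k + 1)) k
      if !(PySem.Set.contains st.2 c) && sfB c primes then (c, PySem.Set.add st.2 c)
      else (c, st.2))
    ((1 : Int), seen)).2

def solve_alt (num_rows : Int) : Int :=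
  let primes := primesB num_rows
  let seen := (PySem.List.pyRange 1 num_rows).foldl
    (fun seen n => scanRowB primes n seen) (PySem.Set.ofList [1])
  seen.sum

-- ===== PRECONDITION & SPEC =====
def Spec_solve (num_rows : Int) (out : Int) : Prop := out = solve_alt num_rows
instance (num_rows : Int) (out : Int) : Decidable (Spec_solve num_rows out) := by unfold Spec_solve; infer_instance

-- ===== CLAIM (what is proved, stated in full; the proofs are below) =====
def Claim_equal_solve : Prop := ∀ (num_rows : Int), Dom_solve num_rows → Spec_solve num_rows (solve num_rows)

-- ===== LEMMAS AND PROOFS =====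

-- row n of Pascal's triangle, as the Int list both programs denote
def chooseRow (r : Nat) : List Int :=
  (List.range (r + 1)).map (fun k => ((r.choose k : Nat) : Int))

theorem chooseRow_length (r : Nat) : (chooseRow r).length = r + 1 := by
  simp [chooseRow]

theorem chooseRow_pyGetD (r m : Nat) (hm : m ≤ r) :
    PySem.List.pyGetD (chooseRow r) (m : Int) 0 = ((r.choose m : Nat) : Int) := by
  rw [chooseRow, PySem.List.pyGetD_natCast, PySem.List.getD_map_range _ _ _ _ (by omega)]

theorem isSquarefreeLoop_eq_all (x : Int) (l : List Int) :
    isSquarefreeLoop x l = l.all (fun p => !(PySem.Int.mod x (p * p) == 0)) := by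
  induction l with
  | nil => rfl
  | cons p ps ih =>
      by_cases h : PySem.Int.mod x (p * p) = 0 <;>
        simp [isSquarefreeLoop, h, ih]

-- choose n k divides n!
theorem choose_dvd_factorial (n k : Nat) (h : k ≤ n) : n.choose k ∣ n.factorial := by
  refine ⟨k.factorial * (n - k).factorial, ?_⟩
  rw [← mul_assoc, Nat.choose_mul_factorial_mul_factorial h]

-- the two squarefreeness tests agree on entries of the triangle
theorem sf_agree (R : Int) (n k : Nat) (hn : (n : Int) < R) (hk : k ≤ n) :
    is_squarefree ((n.choose k : Nat) : Int) R = sfB ((n.choose k : Nat) : Int) (primesB R) := by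
  rw [Bool.eq_iff_iff, is_squarefree, isSquarefreeLoop_eq_all, sfB]
  simp only [List.all_eq_true, Bool.not_eq_true', beq_eq_false_iff_ne, ne_eq,
    PySem.Int.mod_eq_zero_iff_dvd]
  constructor
  · -- range test passes → prime test passes
    intro h p hp hdvd
    have hp' : p ∈ PySem.List.pyRange 2 (R + 1) := by
      have hmem := (List.mem_filter.mp hp).1
      rw [PySem.List.mem_pyRange_one] at hmem ⊢
      omega
    exact h p hp' hdvd
  · -- prime test passes → range test passes
    intro h p hp hdvd
    rw [PySem.List.mem_pyRange_one] at hp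
    -- move to Nat
    have hp2 : (2 : Int) ≤ p := hp.1
    have hpn : ((p.toNat : Nat) : Int) = p := by omega
    have hdvdN : p.toNat * p.toNat ∣ n.choose k := by
      rw [← Int.natCast_dvd_natCast]
      push_cast
      rw [hpn]
      exact hdvd
    -- pass to the least prime factor q of p
    have hq : (p.toNat.minFac).Prime := Nat.minFac_prime (by omega)
    have hqq : p.toNat.minFac * p.toNat.minFac ∣ n.choose k :=
      dvd_trans (Nat.mul_dvd_mul (Nat.minFac_dvd _) (Nat.minFac_dvd _)) hdvdN
    have hqX : p.toNat.minFac ∣ n.choose k := dvd_trans (dvd_mul_right _ _) hqq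
    have hqn : p.toNat.minFac ≤ n :=
      (hq.dvd_factorial).mp (hqX.trans (choose_dvd_factorial n k hk))
    -- q is in the primes list
    have hqmem : ((p.toNat.minFac : Nat) : Int) ∈ primesB R := by
      refine List.mem_filter.mpr ⟨?_, ?_⟩
      · rw [PySem.List.mem_pyRange_one]
        have := hq.two_le
        constructor
        · exact_mod_cast this
        · have : (n : Int) < R := hn
          have h1 : ((p.toNat.minFac : Nat) : Int) ≤ (n : Int) := by exact_mod_cast hqn
          omega
      · rw [isPrimeB]
        simp only [List.all_eq_true, Bool.not_eq_true', beq_eq_false_iff_ne, ne_eq,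
          PySem.Int.mod_eq_zero_iff_dvd]
        intro m hm hmdvd
        rw [PySem.List.mem_pyRange_one] at hm
        have hm2 : (2 : Int) ≤ m := hm.1
        have hmn : ((m.toNat : Nat) : Int) = m := by omega
        have hmdvdN : m.toNat ∣ p.toNat.minFac := by
          rw [← Int.natCast_dvd_natCast]
          rw [hmn]
          exact hmdvd
        have : m.toNat = 1 := by
          have hlt : m.toNat < p.toNat.minFac := by omega
          exact (Nat.prime_def_lt.mp hq).2 m.toNat hlt hmdvdN
        omega
    have := h _ hqmem
    apply this
    rw [← Int.natCast_mul, Int.natCast_dvd_natCast]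
    exact hqq

-- building the next row from row r gives row (r+1)
theorem buildNext_partial (r : Nat) (j : Nat) (hj : j ≤ r) :
    ((PySem.List.pyRange 1 ((j : Int) + 1)).foldl
      (fun nr col =>
        PySem.List.pySetD nr col
          (PySem.List.pyGetD (chooseRow r) (col - 1) 0 + PySem.List.pyGetD (chooseRow r) col 0))
      (List.replicate (r + 2) 1)).length = r + 2 ∧
    ∀ m : Nat, m ≤ r + 1 →
      PySem.List.pyGetD
        ((PySem.List.pyRange 1 ((j : Int) + 1)).foldl
          (fun nr col =>
            PySem.List.pySetD nr col
              (PySem.List.pyGetD (chooseRow r) (col - 1) 0 + PySem.List.pyGetD (chooseRow r) col 0))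
          (List.replicate (r + 2) 1)) (m : Int) 0
      = if 1 ≤ m ∧ m ≤ j then (((r + 1).choose m : Nat) : Int) else 1 := by
  induction j with
  | zero =>
    have h1 : ((0 : Nat) : Int) + 1 = 1 := by norm_num
    rw [h1, show PySem.List.pyRange 1 1 = [] from rfl]
    refine ⟨by simp, ?_⟩
    intro m hm
    rw [List.foldl_nil, if_neg (by omega), PySem.List.pyGetD_natCast,
      List.getD_eq_getElem _ _ (by simp; omega), List.getElem_replicate]
  | succ j ih =>
    obtain ⟨ihlen, ihval⟩ := ih (by omega)
    have hsplit : PySem.List.pyRange 1 (((j + 1 : Nat) : Int) + 1)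
        = PySem.List.pyRange 1 ((j : Int) + 1) ++ [(j : Int) + 1] := by
      push_cast
      exact PySem.List.pyRange_one_succ_right (by omega)
    rw [hsplit, List.foldl_append]
    simp only [List.foldl_cons, List.foldl_nil]
    set P := (PySem.List.pyRange 1 ((j : Int) + 1)).foldl
      (fun nr col =>
        PySem.List.pySetD nr col
          (PySem.List.pyGetD (chooseRow r) (col - 1) 0 + PySem.List.pyGetD (chooseRow r) col 0))
      (List.replicate (r + 2) 1) with hP
    have hread : PySem.List.pyGetD (chooseRow r) ((j : Int) + 1 - 1) 0
        + PySem.List.pyGetD (chooseRow r) ((j : Int) + 1) 0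
        = (((r + 1).choose (j + 1) : Nat) : Int) := by
      have h1 : ((j : Int) + 1 - 1) = ((j : Nat) : Int) := by omega
      have h2 : ((j : Int) + 1) = (((j + 1 : Nat)) : Int) := by push_cast; omega
      rw [h1, h2, chooseRow_pyGetD r j (by omega), chooseRow_pyGetD r (j + 1) (by omega),
        Nat.choose_succ_succ]
      push_cast
      ring
    have hcast : ((j : Int) + 1) = (((j + 1 : Nat)) : Int) := by push_cast; omega
    constructor
    · rw [PySem.List.length_pySetD, ihlen]
    · intro m hm
      rw [hread, hcast, PySem.List.pyGetD_pySetD_natCast _ _ _ _ _ (by rw [ihlen]; omega)]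
      by_cases hmj : m = j + 1
      · rw [if_pos hmj, if_pos (by omega), hmj]
      · rw [if_neg hmj, ihval m hm]
        by_cases h1 : 1 ≤ m ∧ m ≤ j
        · rw [if_pos h1, if_pos (by omega)]
        · rw [if_neg h1, if_neg (by omega)]

theorem buildNext_chooseRow (r : Nat) : buildNext (chooseRow r) = chooseRow (r + 1) := by
  obtain ⟨hplen, hpval⟩ := buildNext_partial r r le_rfl
  unfold buildNext
  have hrep : List.replicate ((chooseRow r).length + 1) (1 : Int) = List.replicate (r + 2) 1 := by
    rw [chooseRow_length]
  rw [hrep]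
  have hb : (((List.replicate (r + 2) (1 : Int)).length : Int)) - 1 = ((r : Nat) : Int) + 1 := by
    simp
    omega
  rw [hb]
  apply List.ext_getElem
  · rw [hplen, chooseRow_length]
  · intro i h1 h2
    have hi : i ≤ r + 1 := by rw [hplen] at h1; omega
    have hv := hpval i hi
    rw [PySem.List.pyGetD_natCast, List.getD_eq_getElem _ _ h1] at hv
    rw [hv]
    have hcr : (chooseRow (r + 1))[i] = (((r + 1).choose i : Nat) : Int) := by
      simp [chooseRow]
    rw [hcr]
    by_cases hc : 1 ≤ i ∧ i ≤ r
    · rw [if_pos hc]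
    · rw [if_neg hc]
      rcases Nat.eq_zero_or_pos i with h0 | hpos
      · subst h0; simp
      · have : i = r + 1 := by omega
        subst this; simp

-- the two inner row scans produce the same set
theorem scan_prefix (R : Int) (n : Nat) (s : PySem.Set Int) (hn : (n : Int) < R)
    (j : Nat) (hj : j ≤ (n + 1) / 2) :
    ∃ t : PySem.Set Int,
      (PySem.List.pyRange 1 ((j : Int) + 1)).foldl
        (fun (st : Int × PySem.Set Int) k =>
          let c := PySem.Int.floordiv (st.1 * ((n : Int) - k + 1)) k
          if !(PySem.Set.contains st.2 c) && sfB c (primesB R) then (c, PySem.Set.add st.2 c)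
          else (c, st.2))
        ((1 : Int), s) = (((n.choose j : Nat) : Int), t) ∧
      (PySem.List.pyRange 1 ((j : Int) + 1)).foldl
        (fun sq i =>
          let x := PySem.List.pyGetD (chooseRow n) i 0
          if is_squarefree x R then PySem.Set.add sq x else sq)
        s = t := by
  induction j with
  | zero =>
    refine ⟨s, ?_, ?_⟩
    · rw [show ((0 : Nat) : Int) + 1 = 1 by norm_num, show PySem.List.pyRange 1 1 = [] from rfl]
      simp [Nat.choose_zero_right]
    · rw [show ((0 : Nat) : Int) + 1 = 1 by norm_num, show PySem.List.pyRange 1 1 = [] from rfl]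
      rfl
  | succ j ih =>
    obtain ⟨t, hB, hA⟩ := ih (by omega)
    have hsplit : PySem.List.pyRange 1 (((j + 1 : Nat) : Int) + 1)
        = PySem.List.pyRange 1 ((j : Int) + 1) ++ [(j : Int) + 1] := by
      push_cast
      exact PySem.List.pyRange_one_succ_right (by omega)
    have hjn : j + 1 ≤ n := by omega
    -- the value produced by B's multiplicative step is C(n, j+1)
    have hc : PySem.Int.floordiv (((n.choose j : Nat) : Int) * ((n : Int) - ((j : Int) + 1) + 1))
        ((j : Int) + 1) = ((n.choose (j + 1) : Nat) : Int) := by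
      have hsub : ((n : Int) - ((j : Int) + 1) + 1) = (((n - j : Nat)) : Int) := by
        push_cast [Nat.cast_sub (by omega : j ≤ n)]
        ring
      rw [hsub, show ((j : Int) + 1) = (((j + 1 : Nat)) : Int) by push_cast; ring,
        ← Int.natCast_mul, ← Nat.choose_succ_right_eq, PySem.Int.floordiv_natCast,
        Nat.mul_div_cancel _ (by omega : 0 < j + 1)]
    -- A reads the same value from the stored row
    have hx : PySem.List.pyGetD (chooseRow n) ((j : Int) + 1) 0 = ((n.choose (j + 1) : Nat) : Int) := by
      rw [show ((j : Int) + 1) = (((j + 1 : Nat)) : Int) by push_cast; ring,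
        chooseRow_pyGetD n (j + 1) hjn]
    have hsf := sf_agree R n (j + 1) hn hjn
    rw [hsplit, List.foldl_append, List.foldl_append, hB, hA]
    simp only [List.foldl_cons, List.foldl_nil, hc, hx, ← hsf]
    by_cases hmem : PySem.Set.contains t ((n.choose (j + 1) : Nat) : Int) = true
    · have hadd : PySem.Set.add t ((n.choose (j + 1) : Nat) : Int) = t := by
        rw [PySem.Set.add, if_pos hmem]
      refine ⟨t, ?_, ?_⟩
      · rw [hmem]
        simp
      · by_cases hsq : is_squarefree ((n.choose (j + 1) : Nat) : Int) R = true
        · rw [if_pos hsq, hadd]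
        · rw [if_neg hsq]
    · have hmemf : PySem.Set.contains t ((n.choose (j + 1) : Nat) : Int) = false :=
        eq_false_of_ne_true hmem
      by_cases hsq : is_squarefree ((n.choose (j + 1) : Nat) : Int) R = true
      · refine ⟨PySem.Set.add t ((n.choose (j + 1) : Nat) : Int), ?_, ?_⟩
        · rw [hmemf, hsq]
          simp
        · rw [if_pos hsq]
      · have hsqf : is_squarefree ((n.choose (j + 1) : Nat) : Int) R = false :=
          eq_false_of_ne_true hsq
        refine ⟨t, ?_, ?_⟩
        · rw [hmemf, hsqf]
          simp
        · rw [if_neg hsq]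

theorem scanRow_eq (R : Int) (n : Nat) (s : PySem.Set Int) (hn : (n : Int) < R) :
    scanRowB (primesB R) (n : Int) s = rowScan R s (chooseRow n) := by
  obtain ⟨t, hB, hA⟩ := scan_prefix R n s hn ((n + 1) / 2) le_rfl
  have hbB : PySem.Int.floordiv ((n : Int) + 1) 2 + 1 = (((n + 1) / 2 : Nat) : Int) + 1 := by
    rw [show ((n : Int) + 1) = (((n + 1 : Nat)) : Int) by push_cast; ring,
      show (2 : Int) = (((2 : Nat)) : Int) by norm_num, PySem.Int.floordiv_natCast]
  have hbA : PySem.Int.floordiv (((chooseRow n).length : Nat) : Int) 2 + 1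
      = (((n + 1) / 2 : Nat) : Int) + 1 := by
    rw [chooseRow_length,
      show (((n + 1 : Nat)) : Int) = ((n : Int) + 1) by push_cast; ring, hbB]
  rw [scanRowB, rowScan, hbB, hbA, hB, hA]

-- the outer loops stay in lockstep
theorem main_loop (R : Int) (m : Nat) (hm1 : 1 ≤ m) (hmR : (m : Int) ≤ R) :
    ∃ s : PySem.Set Int,
      (PySem.List.pyRange 1 (m : Int)).foldl
        (fun (st : PySem.Set Int × List Int) _row =>
          (rowScan R st.1 (buildNext st.2), buildNext st.2))
        (PySem.Set.ofList [1], [1]) = (s, chooseRow (m - 1)) ∧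
      (PySem.List.pyRange 1 (m : Int)).foldl
        (fun seen n => scanRowB (primesB R) n seen) (PySem.Set.ofList [1]) = s := by
  induction m with
  | zero => omega
  | succ m ih =>
    rcases Nat.eq_or_lt_of_le hm1 with h | h
    · -- m + 1 = 1 : empty range, initial state
      have hm0 : m = 0 := by omega
      subst hm0
      exact ⟨PySem.Set.ofList [1], by simp [PySem.List.pyRange, chooseRow], rfl⟩
    · have hm1' : 1 ≤ m := by omega
      obtain ⟨s, hA, hB⟩ := ih hm1' (by push_cast at hmR ⊢; omega)
      have hsplit : PySem.List.pyRange 1 ((m + 1 : Nat) : Int)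
          = PySem.List.pyRange 1 (m : Int) ++ [(m : Int)] := by
        push_cast
        exact PySem.List.pyRange_one_succ_right (by exact_mod_cast hm1')
      have hmR' : (m : Int) < R := by push_cast at hmR; omega
      refine ⟨rowScan R s (chooseRow m), ?_, ?_⟩
      · rw [hsplit, List.foldl_append, hA]
        simp only [List.foldl_cons, List.foldl_nil]
        have hb : buildNext (chooseRow (m - 1)) = chooseRow m := by
          have := buildNext_chooseRow (m - 1)
          rwa [Nat.sub_add_cancel hm1'] at this
        rw [hb]
        rfl
      · rw [hsplit, List.foldl_append, hB]
        simp only [List.foldl_cons, List.foldl_nil]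
        exact scanRow_eq R m s hmR'

-- ===== VERDICT (by name: the statement is the Claim_ definition above) =====
theorem solve_spec : Claim_equal_solve := by
  intro R _
  unfold Spec_solve
  by_cases hR : R ≤ 1
  · simp [solve, solve_alt, PySem.List.pyRange_one_eq_nil hR]
  · have hcast : ((R.toNat : Int)) = R := by omega
    obtain ⟨s, hA, hB⟩ := main_loop R R.toNat (by omega) (by omega)
    simp only [solve, solve_alt]
    rw [show PySem.List.pyRange 1 R = PySem.List.pyRange 1 ((R.toNat : Int)) from by rw [hcast],
      hA, hB]
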